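-- pv_equiv track=rewrite | github.com/hellozjf/algorithm-manage-platform | tensorflow-params-transformer/input_ids_mask_segment_label.py | word2id
-- ===== SOURCE A (Python) =====
-- def word2id(vocab_dict, token, max_length=120):
--     """将词转换为ID表示。"""
--     ids = [vocab_dict.get(i, 0) for i in token.split()]
--
--     while len(ids) < max_length:
--         ids.append(0)
--
--     if len(ids) > max_length:
--         ids = ids[:max_length]
--
--     assert len(ids) == max_length
--     return ids
-- ===== SOURCE B (Python) =====
-- def word2id(vocab_dict, token, max_length=120):
--     """将词转换为ID表示。"""
--     ids = []
--     it = iter(token.split())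
--     for _ in range(max_length):
--         w = next(it, None)
--         ids.append(0 if w is None else vocab_dict.get(w, 0))
--     return ids
-- ===== Notes on version B (the rewrite author's own statement) =====
-- stated objective: alternative
-- what changed: B is one fused loop over the max_length output positions pulling words from an iterator with next(it, None): each slot gets the looked-up id or 0, so mapping, padding and truncation happen in a single pass with no intermediate mapped list, no while-append padding loop, no slice and no assert.
import Mathlib
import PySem

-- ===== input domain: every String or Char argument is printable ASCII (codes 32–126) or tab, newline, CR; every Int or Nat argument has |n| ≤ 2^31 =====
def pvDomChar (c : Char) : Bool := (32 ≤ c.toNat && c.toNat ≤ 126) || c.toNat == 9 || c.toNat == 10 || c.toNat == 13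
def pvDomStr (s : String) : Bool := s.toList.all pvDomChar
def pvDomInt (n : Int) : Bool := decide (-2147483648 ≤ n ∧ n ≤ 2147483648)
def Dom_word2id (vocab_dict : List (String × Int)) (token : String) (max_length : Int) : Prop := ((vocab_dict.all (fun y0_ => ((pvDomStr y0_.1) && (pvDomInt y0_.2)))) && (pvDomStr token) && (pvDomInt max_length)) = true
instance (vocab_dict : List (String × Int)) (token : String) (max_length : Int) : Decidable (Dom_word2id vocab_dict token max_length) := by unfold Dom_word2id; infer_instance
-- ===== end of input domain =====

-- B fuses mapping, padding and truncation into ONE loop over the output positions that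
-- pulls words from an iterator, instead of A's staged map / while-append pad / slice / assert.

-- ===== PORT A =====
-- vocab_dict.get(w, 0): first-match lookup in the association list (dict convention)
def vocabGet (vocab_dict : List (String × Int)) (w : String) : Int :=
  PySem.Dict.getD (PySem.Dict.mk vocab_dict) w 0

-- the 'while len(ids) < max_length: ids.append(0)' loop
def word2idPad (ids : List Int) (max_length : Int) : List Int :=
  if (ids.length : Int) < max_length then word2idPad (ids ++ [0]) max_length else ids
  termination_by (max_length - ids.length).toNat
  decreasing_by simp; omega

def word2id (vocab_dict : List (String × Int)) (token : String) (max_length : Int) : List Int :=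
  let ids := (PySem.Str.split₀ token).map (fun i => vocabGet vocab_dict i)
  let ids := word2idPad ids max_length
  if (ids.length : Int) > max_length then PySem.List.slice ids none (some max_length) else ids
  -- the final 'assert len(ids) == max_length' always holds under Pre_ (0 ≤ max_length)

-- ===== PORT B =====
-- the fused 'for _ in range(max_length): w = next(it, None); ids.append(0 if w is None else get(w))'
-- loop: the iterator state is the remaining token list, the countdown is the remaining slots
def word2idFill (vocab_dict : List (String × Int)) : List String → Nat → List Int
  | _, 0 => []
  | [], Nat.succ n => 0 :: word2idFill vocab_dict [] n
  | t :: ts, Nat.succ n => vocabGet vocab_dict t :: word2idFill vocab_dict ts n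

def word2id_alt (vocab_dict : List (String × Int)) (token : String) (max_length : Int) : List Int :=
  word2idFill vocab_dict (PySem.Str.split₀ token) max_length.toNat
  -- range(max_length) iterates max(0, max_length) times = max_length.toNat

-- ===== PRECONDITION & SPEC =====
-- Pre_ excludes max_length < 0, where A's final 'assert len(ids) == max_length' raises AssertionError.
def Pre_word2id (vocab_dict : List (String × Int)) (token : String) (max_length : Int) : Prop :=
  0 ≤ max_length
instance (vocab_dict : List (String × Int)) (token : String) (max_length : Int) : Decidable (Pre_word2id vocab_dict token max_length) := by unfold Pre_word2id; infer_instance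
def pvWitness_word2id : (List (String × Int)) × String × Int := ([("a", 1)], "a b", 3)

def Spec_word2id (vocab_dict : List (String × Int)) (token : String) (max_length : Int) (out : List Int) : Prop := out = word2id_alt vocab_dict token max_length
instance (vocab_dict : List (String × Int)) (token : String) (max_length : Int) (out : List Int) : Decidable (Spec_word2id vocab_dict token max_length out) := by unfold Spec_word2id; infer_instance

-- ===== CLAIM (what is proved, stated in full; the proofs are below) =====
def Claim_equal_word2id : Prop := ∀ (vocab_dict : List (String × Int)) (token : String) (max_length : Int), Dom_word2id vocab_dict token max_length → Pre_word2id vocab_dict token max_length → Spec_word2id vocab_dict token max_length (word2id vocab_dict token max_length)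

-- ===== LEMMAS AND PROOFS =====

-- the pad loop appends exactly the missing zeros
theorem word2idPad_eq (ids : List Int) (m : Int) :
    word2idPad ids m = ids ++ List.replicate (m - ids.length).toNat 0 := by
  unfold word2idPad
  split
  · rename_i h
    rw [word2idPad_eq (ids ++ [0]) m]
    have : (m.toNat - ids.length) = (m - ((ids.length : Int) + 1)).toNat + 1 := by omega
    simp [this, List.replicate_succ]
  · rename_i h
    have : (m - (ids.length : Int)).toNat = 0 := by omega
    simp [this]
  termination_by (m - ids.length).toNat
  decreasing_by simp; omega

-- B's fused loop = the looked-up prefix of length min(n, |ts|) followed by the missing zeros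
theorem word2idFill_eq (vocab_dict : List (String × Int)) (ts : List String) (n : Nat) :
    word2idFill vocab_dict ts n
      = (ts.map (vocabGet vocab_dict)).take n ++ List.replicate (n - ts.length) 0 := by
  induction n generalizing ts with
  | zero => simp [word2idFill]
  | succ n ih =>
    cases ts with
    | nil => simp [word2idFill, ih, List.replicate_succ]
    | cons t ts => simp [word2idFill, ih ts]

-- ===== VERDICT (by name: the statement is the Claim_ definition above) =====
theorem word2id_spec : Claim_equal_word2id := by
  intro vocab_dict token max_length _ hpre
  have hpre' : (0 : Int) ≤ max_length := hpre
  unfold Spec_word2id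
  simp only [word2id, word2id_alt]
  set tokens := PySem.Str.split₀ token with htok
  set m' : Nat := max_length.toNat with hm'
  rw [word2idPad_eq, word2idFill_eq]
  set vals := tokens.map (vocabGet vocab_dict) with hvals
  have hvlen : vals.length = tokens.length := by simp [hvals]
  by_cases hcase : tokens.length ≤ m'
  · have h1 : (max_length - (vals.length : Int)).toNat = m' - tokens.length := by omega
    rw [h1]
    have hcond : ¬ ((((vals ++ List.replicate (m' - tokens.length) 0).length : Nat) : Int) > max_length) := by
      simp [hvlen]; omega
    rw [if_neg hcond]
    have htake : vals.take m' = vals := List.take_of_length_le (by omega)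
    rw [htake]
  · have h1 : (max_length - (vals.length : Int)).toNat = 0 := by omega
    rw [h1]
    simp only [List.replicate_zero, List.append_nil]
    have hcond : (((vals.length : Nat) : Int) > max_length) := by omega
    rw [if_pos hcond, PySem.List.slice_to vals hpre', ← hm']
    have h2 : m' - tokens.length = 0 := by omega
    simp [h2]
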